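-- pv_equiv track=rewrite | github.com/TkachevPA/def-prof_test_script | calc_dp.py | calc_second_sign
-- ===== SOURCE A (Python) =====
-- def calc_second_sign(remains, zero, deficit, proficit) -> str:
--     result = []
--
--     for i in range(len(remains) - 1):
--         if remains[i + 1] <= zero < remains[i]:
--             result.append('O')
--         elif remains[i + 1] <= deficit < remains[i]:
--             result.append('D')
--         elif remains[i + 1] >= proficit > remains[i]:
--             result.append('P')
--
--     if max(remains) <= zero or 'O' in result:
--         return 'O'
--
--     elif max(remains) <= deficit or 'D' in result:
--         return 'D'
--
--     elif min(remains) >= proficit or 'P' in result: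
--         return 'P'
--
--     else:
--         return 'A'
-- ===== SOURCE B (Python) =====
-- def calc_second_sign(remains, zero, deficit, proficit) -> str:
--     # Counting view: the values strictly above a threshold t form a suffix of the
--     # list exactly when no step falls through t; so a falling crossing of t exists
--     # iff some value > t sits OUTSIDE the last `above` positions.  Dually, a rising
--     # crossing of p exists iff some value >= p sits OUTSIDE the first `at_least`
--     # positions.  No adjacent pairs are ever inspected.
--     n = len(remains)
--
--     def falls_through(t):
--         above = sum(1 for x in remains if x > t)
--         return any(x > t for x in remains[:n - above])
--
--     def rises_to(p):
--         at_least = sum(1 for x in remains if x >= p)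
--         return any(x >= p for x in remains[at_least:])
--
--     if max(remains) <= zero or falls_through(zero):
--         return 'O'
--     if max(remains) <= deficit or falls_through(deficit):
--         return 'D'
--     if min(remains) >= proficit or rises_to(proficit):
--         return 'P'
--     return 'A'
-- ===== Notes on version B (the rewrite author's own statement) =====
-- stated objective: alternative
-- what changed: B never inspects adjacent pairs: it detects a falling crossing of a threshold t by counting how many values exceed t and checking whether any value > t lies outside the last `above` positions (values above t form a suffix iff no step falls through t), dually for rising crossings; A instead loops over indices building a letter list and testing membership.
import Mathlib
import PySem

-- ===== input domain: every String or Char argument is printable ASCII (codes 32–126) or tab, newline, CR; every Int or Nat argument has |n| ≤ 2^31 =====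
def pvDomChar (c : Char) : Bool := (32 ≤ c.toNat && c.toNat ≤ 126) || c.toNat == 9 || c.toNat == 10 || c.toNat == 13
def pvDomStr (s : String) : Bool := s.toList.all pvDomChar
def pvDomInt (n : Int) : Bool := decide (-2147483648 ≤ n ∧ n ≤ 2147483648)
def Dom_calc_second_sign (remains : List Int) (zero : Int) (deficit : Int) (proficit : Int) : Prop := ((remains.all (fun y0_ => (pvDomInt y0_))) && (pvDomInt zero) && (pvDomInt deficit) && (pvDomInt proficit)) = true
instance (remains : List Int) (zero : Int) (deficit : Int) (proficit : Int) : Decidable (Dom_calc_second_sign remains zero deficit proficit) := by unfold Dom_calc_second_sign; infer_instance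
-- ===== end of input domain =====

-- B detects threshold crossings by counting (the values above t form a suffix iff no step
-- falls through t) instead of A's index loop that builds a letter list; objective: alternative.

-- ===== PORT A =====
-- A-side helper: the 'result' list built by A's loop over range(len(remains) - 1).
def pvResult (remains : List Int) (zero : Int) (deficit : Int) (proficit : Int) : List String :=
  (PySem.List.pyRange 0 (PySem.List.len remains - 1) 1).foldl
    (fun acc i =>
      if PySem.List.pyGetD remains (i + 1) 0 ≤ zero ∧ zero < PySem.List.pyGetD remains i 0 then
        acc ++ ["O"]
      else if PySem.List.pyGetD remains (i + 1) 0 ≤ deficit ∧ deficit < PySem.List.pyGetD remains i 0 then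
        acc ++ ["D"]
      else if PySem.List.pyGetD remains (i + 1) 0 ≥ proficit ∧ proficit > PySem.List.pyGetD remains i 0 then
        acc ++ ["P"]
      else acc) []

def calc_second_sign (remains : List Int) (zero : Int) (deficit : Int) (proficit : Int) : String :=
  let result := pvResult remains zero deficit proficit
  match PySem.List.max? remains (fun x => x), PySem.List.min? remains (fun x => x) with
  | some mx, some mn =>
    if mx ≤ zero ∨ result.contains "O" then "O"
    else if mx ≤ deficit ∨ result.contains "D" then "D"
    else if mn ≥ proficit ∨ result.contains "P" then "P"
    else "A"
  | _, _ => ""  -- unreachable under Pre_: Python's max([]) raises ValueError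

-- ===== PORT B =====
-- B-side helpers: the two counting-based crossing tests (no adjacent pairs).
def pvFallsThrough (remains : List Int) (t : Int) : Bool :=
  let above : Int := (remains.countP (fun x => decide (t < x)) : Int)
  (PySem.List.slice remains none (some (PySem.List.len remains - above))).any
    (fun x => decide (t < x))

def pvRisesTo (remains : List Int) (p : Int) : Bool :=
  let atLeast : Int := (remains.countP (fun x => decide (p ≤ x)) : Int)
  (PySem.List.slice remains (some atLeast) none).any (fun x => decide (p ≤ x))

def calc_second_sign_alt (remains : List Int) (zero : Int) (deficit : Int) (proficit : Int) : String :=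
  match PySem.List.max? remains (fun x => x) with
  | none => ""  -- unreachable under Pre_: Python's max([]) raises ValueError
  | some hi =>
    match PySem.List.min? remains (fun x => x) with
    | none => ""  -- unreachable under Pre_
    | some lo =>
      if hi ≤ zero || pvFallsThrough remains zero then "O"
      else if hi ≤ deficit || pvFallsThrough remains deficit then "D"
      else if lo ≥ proficit || pvRisesTo remains proficit then "P"
      else "A"

-- ===== PRECONDITION & SPEC =====
-- Pre_ excludes only the empty list, on which A raises ValueError (max() of an empty sequence).
def Pre_calc_second_sign (remains : List Int) (zero : Int) (deficit : Int) (proficit : Int) : Prop :=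
  remains ≠ []
instance (remains : List Int) (zero : Int) (deficit : Int) (proficit : Int) : Decidable (Pre_calc_second_sign remains zero deficit proficit) := by unfold Pre_calc_second_sign; infer_instance

def pvWitness_calc_second_sign : List Int × Int × Int × Int := ([3, -1, 2], 0, -2, 4)

def Spec_calc_second_sign (remains : List Int) (zero : Int) (deficit : Int) (proficit : Int) (out : String) : Prop := out = calc_second_sign_alt remains zero deficit proficit
instance (remains : List Int) (zero : Int) (deficit : Int) (proficit : Int) (out : String) : Decidable (Spec_calc_second_sign remains zero deficit proficit out) := by unfold Spec_calc_second_sign; infer_instance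

-- ===== CLAIM (what is proved, stated in full; the proofs are below) =====
def Claim_equal_calc_second_sign : Prop := ∀ (remains : List Int) (zero : Int) (deficit : Int) (proficit : Int), Dom_calc_second_sign remains zero deficit proficit → Pre_calc_second_sign remains zero deficit proficit → Spec_calc_second_sign remains zero deficit proficit (calc_second_sign remains zero deficit proficit)

-- ===== LEMMAS AND PROOFS =====

-- a generic statement about scans over the adjacent pairs, at Nat indices
def pvAdj (remains : List Int) (P : Int → Int → Prop) : Prop :=
  ∃ k : Nat, k + 1 < remains.length ∧ P (remains.getD k 0) (remains.getD (k + 1) 0)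

-- A's loop over range(len - 1) is an adjacent-pair scan
theorem pvExists_pyRange_iff (remains : List Int) (P : Int → Int → Prop) :
    (∃ i ∈ PySem.List.pyRange 0 (PySem.List.len remains - 1) 1,
        P (PySem.List.pyGetD remains i 0) (PySem.List.pyGetD remains (i + 1) 0)) ↔
      pvAdj remains P := by
  unfold pvAdj
  constructor
  · rintro ⟨i, hmem, hP⟩
    rw [PySem.List.mem_pyRange_one] at hmem
    simp only [PySem.List.len_eq] at hmem
    obtain ⟨h0, hlt⟩ := hmem
    refine ⟨i.toNat, by omega, ?_⟩
    have e1 := PySem.List.pyGetD_natCast remains i.toNat (0 : Int)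
    rw [show ((i.toNat : Nat) : Int) = i by omega] at e1
    have e2 := PySem.List.pyGetD_natCast remains (i.toNat + 1) (0 : Int)
    rw [show ((i.toNat + 1 : Nat) : Int) = i + 1 by omega] at e2
    rw [e1, e2] at hP
    exact hP
  · rintro ⟨k, hk, hP⟩
    refine ⟨(k : Int), ?_, ?_⟩
    · rw [PySem.List.mem_pyRange_one]
      simp only [PySem.List.len_eq]
      omega
    · rw [show (k : Int) + 1 = ((k + 1 : Nat) : Int) by omega,
        PySem.List.pyGetD_natCast, PySem.List.pyGetD_natCast]
      exact hP

-- membership in A's result list, letter by letter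
theorem pvMem_pvResult (remains : List Int) (zero deficit proficit : Int) (s : String) :
    s ∈ pvResult remains zero deficit proficit ↔
      ∃ i ∈ PySem.List.pyRange 0 (PySem.List.len remains - 1) 1,
        s ∈ (if PySem.List.pyGetD remains (i + 1) 0 ≤ zero ∧ zero < PySem.List.pyGetD remains i 0 then ["O"]
             else if PySem.List.pyGetD remains (i + 1) 0 ≤ deficit ∧ deficit < PySem.List.pyGetD remains i 0 then ["D"]
             else if PySem.List.pyGetD remains (i + 1) 0 ≥ proficit ∧ proficit > PySem.List.pyGetD remains i 0 then ["P"]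
             else []) := by
  unfold pvResult
  have hbody : (fun (acc : List String) (i : Int) =>
      if PySem.List.pyGetD remains (i + 1) 0 ≤ zero ∧ zero < PySem.List.pyGetD remains i 0 then acc ++ ["O"]
      else if PySem.List.pyGetD remains (i + 1) 0 ≤ deficit ∧ deficit < PySem.List.pyGetD remains i 0 then acc ++ ["D"]
      else if PySem.List.pyGetD remains (i + 1) 0 ≥ proficit ∧ proficit > PySem.List.pyGetD remains i 0 then acc ++ ["P"]
      else acc) = (fun acc i => acc ++
        (if PySem.List.pyGetD remains (i + 1) 0 ≤ zero ∧ zero < PySem.List.pyGetD remains i 0 then ["O"]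
         else if PySem.List.pyGetD remains (i + 1) 0 ≤ deficit ∧ deficit < PySem.List.pyGetD remains i 0 then ["D"]
         else if PySem.List.pyGetD remains (i + 1) 0 ≥ proficit ∧ proficit > PySem.List.pyGetD remains i 0 then ["P"]
         else [])) := by
    funext acc i
    split_ifs <;> simp
  rw [hbody, PySem.List.foldl_append_eq_flatMap]
  simp [List.mem_flatMap]

theorem pvMemO (remains : List Int) (zero deficit proficit : Int) :
    "O" ∈ pvResult remains zero deficit proficit ↔
      pvAdj remains (fun a b => b ≤ zero ∧ zero < a) := by
  rw [pvMem_pvResult, ← pvExists_pyRange_iff]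
  refine exists_congr fun i => and_congr_right fun _ => ?_
  split_ifs <;> simp_all

theorem pvMemD (remains : List Int) (zero deficit proficit : Int) :
    "D" ∈ pvResult remains zero deficit proficit ↔
      pvAdj remains (fun a b => ¬(b ≤ zero ∧ zero < a) ∧ (b ≤ deficit ∧ deficit < a)) := by
  rw [pvMem_pvResult, ← pvExists_pyRange_iff]
  refine exists_congr fun i => and_congr_right fun _ => ?_
  split_ifs <;> simp_all

theorem pvMemP (remains : List Int) (zero deficit proficit : Int) :
    "P" ∈ pvResult remains zero deficit proficit ↔
      pvAdj remains (fun a b => b ≥ proficit ∧ proficit > a) := by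
  rw [pvMem_pvResult, ← pvExists_pyRange_iff]
  refine exists_congr fun i => and_congr_right fun _ => ?_
  split_ifs with h1 h2 h3 <;> simp_all <;> omega

-- if no step falls through t, being above t propagates forward
theorem pvNoDrop_mono (remains : List Int) (t : Int)
    (h : ¬ pvAdj remains (fun a b => b ≤ t ∧ t < a)) :
    ∀ i j : Nat, i ≤ j → j < remains.length → t < remains.getD i 0 → t < remains.getD j 0 := by
  intro i j hij
  induction j, hij using Nat.le_induction with
  | base => intro _ hi; exact hi
  | succ j hij ih =>
    intro hj hi
    have hfj := ih (by omega) hi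
    by_contra hle
    exact h ⟨j, hj, by omega, hfj⟩

-- if no step rises to p, being at/above p propagates backward
theorem pvNoRise_mono (remains : List Int) (p : Int)
    (h : ¬ pvAdj remains (fun a b => b ≥ p ∧ p > a)) :
    ∀ i j : Nat, i ≤ j → j < remains.length → p ≤ remains.getD j 0 → p ≤ remains.getD i 0 := by
  intro i j hij
  induction j, hij using Nat.le_induction with
  | base => intro _ hi; exact hi
  | succ j hij ih =>
    intro hj hjv
    have hpj : p ≤ remains.getD j 0 := by
      by_contra hlt
      exact h ⟨j, hj, by omega, by omega⟩
    exact ih (by omega) hpj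

-- B's counting test detects exactly the falling crossings
theorem pvFallsThrough_iff (remains : List Int) (t : Int) :
    pvFallsThrough remains t = true ↔ pvAdj remains (fun a b => b ≤ t ∧ t < a) := by
  have hcn : remains.countP (fun x => decide (t < x)) ≤ remains.length :=
    List.countP_le_length
  set n := remains.length with hn
  set c := remains.countP (fun x => decide (t < x)) with hc
  have hslice : PySem.List.slice remains none (some (PySem.List.len remains - (c : Int))) =
      remains.take (n - c) := by
    have he : PySem.List.len remains - (c : Int) = ((n - c : Nat) : Int) := by
      simp only [PySem.List.len_eq, ← hn]; omega
    rw [he, PySem.List.slice_to_natCast]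
  show (PySem.List.slice remains none (some (PySem.List.len remains - (c : Int)))).any
      (fun x => decide (t < x)) = true ↔ _
  rw [hslice, List.any_eq_true]
  constructor
  · rintro ⟨x, hmem, hx⟩
    rw [List.mem_iff_getElem] at hmem
    obtain ⟨i, hi, rfl⟩ := hmem
    rw [List.getElem_take] at hx
    have hilt : i < n - c := by simp [List.length_take, ← hn] at hi; omega
    have hiln : i < n := by
      have := List.length_take_le (n - c) remains; omega
    by_contra hno
    have hall : ∀ y ∈ remains.drop i, decide (t < y) = true := by
      intro y hy
      rw [List.mem_iff_getElem] at hy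
      obtain ⟨j, hj, rfl⟩ := hy
      rw [List.getElem_drop]
      have hjn : i + j < n := by simp [List.length_drop, ← hn] at hj; omega
      have := pvNoDrop_mono remains t hno i (i + j) (by omega) hjn
        (by rw [List.getD_eq_getElem _ _ hiln]; simpa using hx)
      rw [List.getD_eq_getElem _ _ hjn] at this
      simpa using this
    have hd : (remains.drop i).countP (fun x => decide (t < x)) = (remains.drop i).length :=
      List.countP_eq_length.mpr hall
    have hsplit := List.take_append_drop i remains
    have : c = (remains.take i).countP (fun x => decide (t < x)) +
        (remains.drop i).countP (fun x => decide (t < x)) := by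
      rw [hc]; conv_lhs => rw [← hsplit]
      rw [List.countP_append]
    rw [hd] at this
    simp [List.length_drop, ← hn] at this
    omega
  · rintro ⟨k, hk, hkb, hka⟩
    by_contra hno
    push Not at hno
    have hz : (remains.take (n - c)).countP (fun x => decide (t < x)) = 0 := by
      rw [List.countP_eq_zero]
      intro y hy
      simpa using hno y hy
    have hsplit := List.take_append_drop (n - c) remains
    have hcd : (remains.drop (n - c)).countP (fun x => decide (t < x)) = c := by
      have : c = (remains.take (n - c)).countP (fun x => decide (t < x)) +
          (remains.drop (n - c)).countP (fun x => decide (t < x)) := by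
        rw [hc]; conv_lhs => rw [← hsplit]
        rw [List.countP_append]
      omega
    have hlend : (remains.drop (n - c)).length = c := by
      simp [List.length_drop, ← hn]; omega
    have hall : ∀ y ∈ remains.drop (n - c), decide (t < y) = true :=
      List.countP_eq_length.mp (by rw [hcd, hlend])
    have hkn : k < n := by omega
    have hkge : n - c ≤ k := by
      by_contra hklt
      have hmemk : remains[k] ∈ remains.take (n - c) := by
        have hk' : k < (remains.take (n - c)).length := by
          simp [List.length_take, ← hn]; omega
        have := List.getElem_mem hk'
        rwa [List.getElem_take] at this
      have := hno _ hmemk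
      rw [List.getD_eq_getElem _ _ hkn] at hka
      simp at this
      omega
    have hmemk1 : remains[k + 1] ∈ remains.drop (n - c) := by
      have hlt : k + 1 - (n - c) < (remains.drop (n - c)).length := by
        simp [List.length_drop, ← hn]; omega
      rw [List.mem_iff_getElem]
      refine ⟨k + 1 - (n - c), hlt, ?_⟩
      rw [List.getElem_drop]
      congr 1
      omega
    have := hall _ hmemk1
    rw [List.getD_eq_getElem _ _ (by omega : k + 1 < remains.length)] at hkb
    simp at this
    omega

-- B's counting test detects exactly the rising crossings
theorem pvRisesTo_iff (remains : List Int) (p : Int) :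
    pvRisesTo remains p = true ↔ pvAdj remains (fun a b => b ≥ p ∧ p > a) := by
  have hcn : remains.countP (fun x => decide (p ≤ x)) ≤ remains.length :=
    List.countP_le_length
  set n := remains.length with hn
  set c := remains.countP (fun x => decide (p ≤ x)) with hc
  have hslice : PySem.List.slice remains (some (c : Int)) none = remains.drop c :=
    PySem.List.slice_from_natCast remains c
  show (PySem.List.slice remains (some (c : Int)) none).any (fun x => decide (p ≤ x)) = true ↔ _
  rw [hslice, List.any_eq_true]
  constructor
  · rintro ⟨x, hmem, hx⟩
    rw [List.mem_iff_getElem] at hmem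
    obtain ⟨j, hj, rfl⟩ := hmem
    rw [List.getElem_drop] at hx
    have hjn : c + j < n := by simp [List.length_drop, ← hn] at hj; omega
    by_contra hno
    have hall : ∀ y ∈ remains.take (c + j + 1), decide (p ≤ y) = true := by
      intro y hy
      rw [List.mem_iff_getElem] at hy
      obtain ⟨i, hi, rfl⟩ := hy
      rw [List.getElem_take]
      have hilen : i < c + j + 1 := by simp [List.length_take, ← hn] at hi; omega
      have hin : i < n := by
        have := List.length_take_le (c + j + 1) remains; omega
      have := pvNoRise_mono remains p hno i (c + j) (by omega) hjn
        (by rw [List.getD_eq_getElem _ _ hjn]; simpa using hx)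
      rw [List.getD_eq_getElem _ _ hin] at this
      simpa using this
    have ht : (remains.take (c + j + 1)).countP (fun x => decide (p ≤ x)) =
        (remains.take (c + j + 1)).length :=
      List.countP_eq_length.mpr hall
    have hlent : (remains.take (c + j + 1)).length = c + j + 1 := by
      simp [List.length_take, ← hn]; omega
    have hsplit := List.take_append_drop (c + j + 1) remains
    have : c = (remains.take (c + j + 1)).countP (fun x => decide (p ≤ x)) +
        (remains.drop (c + j + 1)).countP (fun x => decide (p ≤ x)) := by
      rw [hc]; conv_lhs => rw [← hsplit]
      rw [List.countP_append]
    omega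
  · rintro ⟨k, hk, hkb, hka⟩
    by_contra hno
    push Not at hno
    have hz : (remains.drop c).countP (fun x => decide (p ≤ x)) = 0 := by
      rw [List.countP_eq_zero]
      intro y hy
      simpa using hno y hy
    have hsplit := List.take_append_drop c remains
    have hct : (remains.take c).countP (fun x => decide (p ≤ x)) = c := by
      have : c = (remains.take c).countP (fun x => decide (p ≤ x)) +
          (remains.drop c).countP (fun x => decide (p ≤ x)) := by
        rw [hc]; conv_lhs => rw [← hsplit]
        rw [List.countP_append]
      omega
    have hlent : (remains.take c).length = c := by
      simp [List.length_take, ← hn]; omega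
    have hall : ∀ y ∈ remains.take c, decide (p ≤ y) = true :=
      List.countP_eq_length.mp (by rw [hct, hlent])
    have hkn : k < n := by omega
    have hkge : c ≤ k := by
      by_contra hklt
      have hmemk : remains[k] ∈ remains.take c := by
        have hk' : k < (remains.take c).length := by omega
        have := List.getElem_mem hk'
        rwa [List.getElem_take] at this
      have := hall _ hmemk
      rw [List.getD_eq_getElem _ _ hkn] at hka
      simp at this
      omega
    have hmemk1 : remains[k + 1] ∈ remains.drop c := by
      have hlt : k + 1 - c < (remains.drop c).length := by
        simp [List.length_drop, ← hn]; omega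
      rw [List.mem_iff_getElem]
      refine ⟨k + 1 - c, hlt, ?_⟩
      rw [List.getElem_drop]
      congr 1
      omega
    have := hno _ hmemk1
    rw [List.getD_eq_getElem _ _ (by omega : k + 1 < remains.length)] at hkb
    simp at this
    omega

-- ===== VERDICT (by name: the statement is the Claim_ definition above) =====
theorem calc_second_sign_spec : Claim_equal_calc_second_sign := by
  intro remains zero deficit proficit _hdom hpre
  unfold Spec_calc_second_sign calc_second_sign calc_second_sign_alt
  obtain ⟨mx, hmx⟩ : ∃ mx, PySem.List.max? remains (fun x => x) = some mx := by
    cases h : PySem.List.max? remains (fun x => x) with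
    | none => exact absurd ((PySem.List.max?_eq_none_iff remains _).mp h) hpre
    | some m => exact ⟨m, rfl⟩
  obtain ⟨mn, hmn⟩ : ∃ mn, PySem.List.min? remains (fun x => x) = some mn := by
    cases h : PySem.List.min? remains (fun x => x) with
    | none => exact absurd ((PySem.List.min?_eq_none_iff remains _).mp h) hpre
    | some m => exact ⟨m, rfl⟩
  rw [hmx, hmn]
  dsimp only
  have hOA : (mx ≤ zero ∨ (pvResult remains zero deficit proficit).contains "O" = true) ↔
      (mx ≤ zero ∨ pvAdj remains (fun a b => b ≤ zero ∧ zero < a)) := by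
    simp [pvMemO]
  have hOB : ((decide (mx ≤ zero) || pvFallsThrough remains zero) = true) ↔
      (mx ≤ zero ∨ pvAdj remains (fun a b => b ≤ zero ∧ zero < a)) := by
    simp [pvFallsThrough_iff]
  by_cases h1 : mx ≤ zero ∨ pvAdj remains (fun a b => b ≤ zero ∧ zero < a)
  · rw [if_pos (hOA.mpr h1), if_pos (hOB.mpr h1)]
  · rw [if_neg (fun h => h1 (hOA.mp h)), if_neg (fun h => h1 (hOB.mp h))]
    have hnoO : ∀ k : Nat, k + 1 < remains.length →
        ¬(remains.getD (k + 1) 0 ≤ zero ∧ zero < remains.getD k 0) := by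
      intro k hk hc
      exact h1 (Or.inr ⟨k, hk, hc⟩)
    have hDA : (mx ≤ deficit ∨ (pvResult remains zero deficit proficit).contains "D" = true) ↔
        (mx ≤ deficit ∨ pvAdj remains (fun a b => b ≤ deficit ∧ deficit < a)) := by
      simp only [List.contains_eq_mem, decide_eq_true_iff, pvMemD]
      refine or_congr_right ?_
      constructor
      · rintro ⟨k, hk, _, hd⟩; exact ⟨k, hk, hd⟩
      · rintro ⟨k, hk, hd⟩; exact ⟨k, hk, hnoO k hk, hd⟩
    have hDB : ((decide (mx ≤ deficit) || pvFallsThrough remains deficit) = true) ↔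
        (mx ≤ deficit ∨ pvAdj remains (fun a b => b ≤ deficit ∧ deficit < a)) := by
      simp [pvFallsThrough_iff]
    by_cases h2 : mx ≤ deficit ∨ pvAdj remains (fun a b => b ≤ deficit ∧ deficit < a)
    · rw [if_pos (hDA.mpr h2), if_pos (hDB.mpr h2)]
    · rw [if_neg (fun h => h2 (hDA.mp h)), if_neg (fun h => h2 (hDB.mp h))]
      have hPA : (mn ≥ proficit ∨ (pvResult remains zero deficit proficit).contains "P" = true) ↔
          (mn ≥ proficit ∨ pvAdj remains (fun a b => b ≥ proficit ∧ proficit > a)) := by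
        simp [pvMemP]
      have hPB : ((decide (mn ≥ proficit) || pvRisesTo remains proficit) = true) ↔
          (mn ≥ proficit ∨ pvAdj remains (fun a b => b ≥ proficit ∧ proficit > a)) := by
        simp only [Bool.or_eq_true, decide_eq_true_iff, pvRisesTo_iff]
      by_cases h3 : mn ≥ proficit ∨ pvAdj remains (fun a b => b ≥ proficit ∧ proficit > a)
      · rw [if_pos (hPA.mpr h3), if_pos (hPB.mpr h3)]
      · rw [if_neg (fun h => h3 (hPA.mp h)), if_neg (fun h => h3 (hPB.mp h))]
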